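-- pv_equiv track=rewrite | github.com/YanivZimmer/Applied-probability-models-for-cs-ex-2 | code/main.py | counter_to_dictionary
-- ===== SOURCE A (Python) =====
-- def counter_to_dictionary(counter_data):
--     occurrences_word_dict = {}
--     max_occourence = 0
--     for item, occourence in counter_data.items():
--         if occourence in occurrences_word_dict:
--             occurrences_word_dict[occourence].append(item)
--         else:
--             occurrences_word_dict[occourence] = [item]
--         max_occourence = max(max_occourence, occourence)
--     return occurrences_word_dict, max_occourence
-- ===== SOURCE B (Python) =====
-- def counter_to_dictionary(counter_data):
--     items = list(counter_data.items())
--     counts = list(dict.fromkeys(c for _, c in items))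
--     occurrences_word_dict = {c: [w for w, c2 in items if c2 == c] for c in counts}
--     return occurrences_word_dict, max([0, *(c for _, c in items)])
-- ===== Notes on version B (the rewrite author's own statement) =====
-- stated objective: alternative
-- what changed: Replaces the single incremental dict-building loop (membership test + append/insert per item, max tracked alongside) with a declarative two-phase construction: dedup the counts in first-seen order, then build each bucket by one comprehension over the items, with the max taken separately over all counts.
import Mathlib
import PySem

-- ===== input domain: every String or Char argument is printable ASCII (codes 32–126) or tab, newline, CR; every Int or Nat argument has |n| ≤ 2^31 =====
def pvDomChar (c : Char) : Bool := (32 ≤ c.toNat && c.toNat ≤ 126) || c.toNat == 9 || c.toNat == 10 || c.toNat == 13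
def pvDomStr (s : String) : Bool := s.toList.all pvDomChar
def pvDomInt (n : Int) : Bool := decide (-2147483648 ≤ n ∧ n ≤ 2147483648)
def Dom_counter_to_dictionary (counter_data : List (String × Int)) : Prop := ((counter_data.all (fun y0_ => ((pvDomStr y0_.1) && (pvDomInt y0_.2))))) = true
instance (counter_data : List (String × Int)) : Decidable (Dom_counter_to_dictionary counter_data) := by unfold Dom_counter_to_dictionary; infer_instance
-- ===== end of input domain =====

-- B replaces A's incremental dict-building loop by a declarative construction: dedup the
-- counts in first-seen order, one filter-comprehension per count for its bucket, max taken
-- separately over all counts (alternative decomposition, not claimed faster).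


-- ===== PORT A =====
-- literal port: one fold over the items carrying (dict, running max);
-- `occourence in d` is `contains`, append vs fresh-insert branch kept as in the Python
def counter_to_dictionary (counter_data : List (String × Int)) : (List (Int × List String)) × Int :=
  let r := counter_data.foldl
    (fun (st : PySem.Dict Int (List String) × Int) p =>
      let d := st.1
      let d' := if d.contains p.2 then d.modify p.2 [] (fun l => l ++ [p.1])
                else d.insert p.2 [p.1]
      (d', max st.2 p.2))
    (PySem.Dict.empty, 0)
  (r.1.items, r.2)

-- ===== PORT B =====
-- port of Source B: counts := dict.fromkeys (first-seen dedup), buckets by filter, max over 0 :: counts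
def counter_to_dictionary_alt (counter_data : List (String × Int)) : (List (Int × List String)) × Int :=
  let counts := PySem.List.dedup (counter_data.map (fun p => p.2))
  let occ := counts.map (fun c => (c, (counter_data.filter (fun p => p.2 == c)).map (fun p => p.1)))
  let m := (PySem.List.max? ((0 : Int) :: counter_data.map (fun p => p.2)) (fun x => x)).getD 0
  (occ, m)

-- ===== PRECONDITION & SPEC =====
def Spec_counter_to_dictionary (counter_data : List (String × Int)) (out : (List (Int × List String)) × Int) : Prop := out = counter_to_dictionary_alt counter_data
instance (counter_data : List (String × Int)) (out : (List (Int × List String)) × Int) : Decidable (Spec_counter_to_dictionary counter_data out) := by unfold Spec_counter_to_dictionary; infer_instance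

-- ===== CLAIM (what is proved, stated in full; the proofs are below) =====
def Claim_equal_counter_to_dictionary : Prop := ∀ (counter_data : List (String × Int)), Dom_counter_to_dictionary counter_data → Spec_counter_to_dictionary counter_data (counter_to_dictionary counter_data)

-- ===== LEMMAS AND PROOFS =====

-- A's if/else step is exactly Dict.modify (fresh key: getD is the default [])
lemma ctd_step_eq_modify (d : PySem.Dict Int (List String)) (p : String × Int) :
    (if d.contains p.2 then d.modify p.2 [] (fun l => l ++ [p.1]) else d.insert p.2 [p.1])
      = d.modify p.2 [] (fun l => l ++ [p.1]) := by
  by_cases h : d.contains p.2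
  · simp [h]
  · simp only [Bool.not_eq_true] at h
    simp [h, PySem.Dict.modify, PySem.Dict.getD_of_not_contains _ _ h]

-- the dict half of A's fold, as an items list
lemma ctd_dict_items (cd : List (String × Int)) :
    (cd.foldl (fun (d : PySem.Dict Int (List String)) p => d.modify p.2 [] (fun l => l ++ [p.1]))
        PySem.Dict.empty).items
      = (PySem.List.dedup (cd.map (fun p => p.2))).map
          (fun c => (c, (cd.filter (fun p => p.2 == c)).map (fun p => p.1))) := by
  set D := cd.foldl (fun (d : PySem.Dict Int (List String)) p => d.modify p.2 [] (fun l => l ++ [p.1]))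
      PySem.Dict.empty with hD
  have hkeys : D.keys = PySem.Set.ofList (cd.map (fun p => p.2)) := by
    rw [hD, PySem.Dict.keys_foldl_modify_key cd (fun p => p.2) [] (fun _ p => fun l => l ++ [p.1])]
    simp [PySem.Set.update, PySem.Set.ofList_eq_foldl]
  have hnd : D.keys.Nodup := by
    rw [hD]
    exact PySem.Dict.nodup_keys_foldl_modify_key cd (fun p => p.2) [] _ _ (by simp)
  have hgetD : ∀ c : Int, D.getD c [] = (cd.filter (fun p => p.2 == c)).map (fun p => p.1) := by
    intro c
    have hfold : D = (cd.map (fun p => (p.2, p.1))).foldl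
        (fun (d : PySem.Dict Int (List String)) q => d.modify q.1 [] (fun l => l ++ [q.2]))
        PySem.Dict.empty := by
      rw [hD, List.foldl_map]
    rw [hfold, PySem.Dict.getD_foldl_modify_append]
    simp [List.filter_map, List.map_map, Function.comp_def]
  rw [PySem.Dict.items_eq_map_keys D hnd [], hkeys, ← PySem.List.dedup_eq_ofList]
  exact List.map_congr_left (fun c _ => by rw [hgetD c])

-- max? over a cons with identity key is the left fold of max
lemma max?_cons_foldl (a : Int) (l : List Int) :
    PySem.List.max? (a :: l) (fun x => x) = some (l.foldl max a) := by
  simp only [PySem.List.max?, List.foldl_cons]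
  exact List.foldl_hom some (fun x y => by dsimp only; split_ifs <;> (congr 1; omega))

-- the max half of A's fold equals B's max expression
lemma ctd_max (cd : List (String × Int)) :
    cd.foldl (fun (m : Int) p => max m p.2) 0
      = (PySem.List.max? ((0 : Int) :: cd.map (fun p => p.2)) (fun x => x)).getD 0 := by
  rw [max?_cons_foldl, Option.getD_some, List.foldl_map]

-- ===== VERDICT (by name: the statement is the Claim_ definition above) =====
theorem counter_to_dictionary_spec : Claim_equal_counter_to_dictionary := by
  intro cd _
  show counter_to_dictionary cd = counter_to_dictionary_alt cd
  unfold counter_to_dictionary counter_to_dictionary_alt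
  have hstep : (fun (st : PySem.Dict Int (List String) × Int) (p : String × Int) =>
      let d := st.1
      let d' := if d.contains p.2 then d.modify p.2 [] (fun l => l ++ [p.1])
                else d.insert p.2 [p.1]
      (d', max st.2 p.2))
    = (fun st p => (st.1.modify p.2 [] (fun l => l ++ [p.1]), max st.2 p.2)) := by
    funext st p
    simp only [ctd_step_eq_modify]
  simp only [hstep]
  rw [PySem.List.foldl_prod_mk (fun (d : PySem.Dict Int (List String)) (p : String × Int) =>
        d.modify p.2 [] (fun l => l ++ [p.1])) (fun (m : Int) p => max m p.2) cd PySem.Dict.empty 0]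
  exact Prod.ext (ctd_dict_items cd) (ctd_max cd)
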